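-- pv_equiv track=rewrite | github.com/taravancil/cryptopals | python/_crypto/blocks.py | has_repeated_block
-- ===== SOURCE A (Python) =====
-- def has_repeated_block(_bytes, blocksize):
--     blocks = split_into_blocks(_bytes, blocksize)
--     tmp = set()
--
--     for block in blocks:
--         if block not in tmp:
--             tmp.add(block)
--         else:
--             return True
--
--     return False
--
-- def split_into_blocks(_bytes, blocksize):
--     return [_bytes[i:i+blocksize] for i in range(0, len(_bytes))]
-- ===== SOURCE B (Python) =====
-- def has_repeated_block(_bytes, blocksize):
--     blocks = sorted(split_into_blocks(_bytes, blocksize))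
--     for prev, cur in zip(blocks, blocks[1:]):
--         if prev == cur:
--             return True
--     return False
--
-- def split_into_blocks(_bytes, blocksize):
--     return [_bytes[i:i+blocksize] for i in range(0, len(_bytes))]
-- ===== Notes on version B (the rewrite author's own statement) =====
-- stated objective: alternative
-- what changed: B replaces A's incremental hash-set membership loop by sorting the full block list and scanning adjacent pairs for the first equal neighbours.
import Mathlib
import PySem

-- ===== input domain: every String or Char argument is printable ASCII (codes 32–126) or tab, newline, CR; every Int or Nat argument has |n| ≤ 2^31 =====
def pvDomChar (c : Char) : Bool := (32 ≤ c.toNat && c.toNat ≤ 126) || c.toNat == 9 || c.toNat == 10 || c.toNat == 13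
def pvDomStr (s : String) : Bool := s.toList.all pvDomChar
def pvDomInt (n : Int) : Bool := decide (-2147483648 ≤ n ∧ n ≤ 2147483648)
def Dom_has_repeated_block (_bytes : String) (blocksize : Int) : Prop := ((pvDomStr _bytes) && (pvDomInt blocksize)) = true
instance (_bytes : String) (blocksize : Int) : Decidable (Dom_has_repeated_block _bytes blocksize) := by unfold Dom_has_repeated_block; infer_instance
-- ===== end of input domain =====

-- B replaces A's incremental hash-set membership loop by sorting the block list and scanning
-- adjacent pairs (objective: alternative algorithm, similar cost).

-- ===== PORT A =====
-- helper shared by both Python sources: the overlapping step-1 slices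
def split_into_blocks (_bytes : String) (blocksize : Int) : List String :=
  (PySem.List.pyRange 0 (PySem.Str.len _bytes) 1).map
    (fun i => PySem.Str.slice _bytes (some i) (some (i + blocksize)))

-- A's loop: a set 'tmp', return True on the first block already seen
def hrbLoopA : List String → PySem.Set String → Bool
  | [], _ => false
  | b :: rest, tmp =>
      if PySem.Set.contains tmp b = false then hrbLoopA rest (PySem.Set.add tmp b)
      else true

def has_repeated_block (_bytes : String) (blocksize : Int) : Bool :=
  hrbLoopA (split_into_blocks _bytes blocksize) PySem.Set.empty

-- ===== PORT B =====
-- B's scan over zip(blocks, blocks[1:]): True on the first equal adjacent pair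
def adjEqScan : List String → Bool
  | a :: b :: t => if a == b then true else adjEqScan (b :: t)
  | _ => false

def has_repeated_block_alt (_bytes : String) (blocksize : Int) : Bool :=
  adjEqScan (PySem.List.sorted (split_into_blocks _bytes blocksize) (fun x => x) false)

-- ===== PRECONDITION & SPEC =====
def Spec_has_repeated_block (_bytes : String) (blocksize : Int) (out : Bool) : Prop := out = has_repeated_block_alt _bytes blocksize
instance (_bytes : String) (blocksize : Int) (out : Bool) : Decidable (Spec_has_repeated_block _bytes blocksize out) := by unfold Spec_has_repeated_block; infer_instance

-- ===== CLAIM (what is proved, stated in full; the proofs are below) =====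
def Claim_equal_has_repeated_block : Prop := ∀ (_bytes : String) (blocksize : Int), Dom_has_repeated_block _bytes blocksize → Spec_has_repeated_block _bytes blocksize (has_repeated_block _bytes blocksize)

-- ===== LEMMAS AND PROOFS =====

-- A's loop returns false iff the remaining blocks are distinct and none was seen before
theorem hrbLoopA_false_iff (l : List String) (tmp : PySem.Set String) :
    hrbLoopA l tmp = false ↔ l.Nodup ∧ ∀ x ∈ l, x ∉ tmp := by
  induction l generalizing tmp with
  | nil => simp [hrbLoopA]
  | cons b rest ih =>
      by_cases hb : b ∈ tmp
      · have hc : PySem.Set.contains tmp b = true := by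
          simp [PySem.Set.contains, hb]
        simp only [hrbLoopA, hc]
        simp only [Bool.true_eq_false, if_false, false_iff, not_and]
        intro _ h
        exact absurd hb (h b (List.mem_cons_self))
      · have hc : PySem.Set.contains tmp b = false := by
          simp [PySem.Set.contains, hb]
        simp only [hrbLoopA, hc, if_pos]
        rw [ih]
        constructor
        · rintro ⟨hnd, hall⟩
          have hbr : b ∉ rest := fun hmem =>
            hall b hmem ((PySem.Set.mem_add tmp b b).mpr (Or.inr rfl))
          refine ⟨List.nodup_cons.mpr ⟨hbr, hnd⟩, ?_⟩
          intro x hx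
          rcases List.mem_cons.mp hx with rfl | hx'
          · exact hb
          · exact fun hxt => hall x hx' ((PySem.Set.mem_add tmp b x).mpr (Or.inl hxt))
        · rintro ⟨hnd, hall⟩
          rcases List.nodup_cons.mp hnd with ⟨hbr, hnd'⟩
          refine ⟨hnd', ?_⟩
          intro x hx hxadd
          rcases (PySem.Set.mem_add tmp b x).mp hxadd with hxt | rfl
          · exact hall x (List.mem_cons_of_mem _ hx) hxt
          · exact hbr hx

-- the adjacent scan on a ≤-sorted list returns false iff the list has no duplicates
theorem adjEqScan_false_iff (l : List String) (h : l.Pairwise (· ≤ ·)) :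
    adjEqScan l = false ↔ l.Nodup := by
  induction l with
  | nil => simp [adjEqScan]
  | cons a t ih =>
      cases t with
      | nil => simp [adjEqScan]
      | cons b t' =>
          have hp : (b :: t').Pairwise (· ≤ ·) := h.tail
          have hab : a ≤ b := (List.pairwise_cons.mp h).1 b (by simp)
          have hbt : ∀ x ∈ t', b ≤ x := fun x hx => (List.pairwise_cons.mp hp).1 x hx
          rw [show adjEqScan (a :: b :: t') = if a == b then true else adjEqScan (b :: t') from rfl]
          by_cases hab' : a = b
          · subst hab'; simp [List.nodup_cons]
          · rw [if_neg (by simp [hab'])]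
            rw [ih hp]
            have hlt : a < b := lt_of_le_of_ne hab hab'
            constructor
            · intro hnd
              refine List.nodup_cons.mpr ⟨?_, hnd⟩
              intro hmem
              rcases List.mem_cons.mp hmem with rfl | hmem'
              · exact hab' rfl
              · exact absurd (lt_of_lt_of_le hlt (hbt a hmem')) (lt_irrefl a)
            · intro hnd; exact (List.nodup_cons.mp hnd).2

theorem eq_of_false_iff_nodup (x y : Bool) (P : Prop)
    (hx : x = false ↔ P) (hy : y = false ↔ P) : x = y := by
  cases x <;> cases y <;> simp_all

-- ===== VERDICT (by name: the statement is the Claim_ definition above) =====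
theorem has_repeated_block_spec : Claim_equal_has_repeated_block := by
  intro s bs _
  unfold Spec_has_repeated_block has_repeated_block has_repeated_block_alt
  set l := split_into_blocks s bs with hl
  refine eq_of_false_iff_nodup _ _ l.Nodup ?_ ?_
  · rw [hrbLoopA_false_iff]
    simp [PySem.Set.empty]
  · rw [adjEqScan_false_iff _ (PySem.List.sorted_pairwise l (fun x => x) )]
    exact List.Perm.nodup_iff (PySem.List.sorted_perm l (fun x => x) false)
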